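-- pv_equiv track=rewrite | github.com/qianlima-lab/SpanDLA | utils.py | transform2class
-- ===== SOURCE A (Python) =====
-- def transform2class(seg):
--     pre = 0
--     length = len(seg)
--     result = [-1] * length
--     cur = pre
--     while cur < length:
--         while cur < length and seg[cur] == 0:
--             cur += 1
--         if cur == length:
--             result[pre:length] = [seg[pre - 1]] * (length - pre)
--             return result
--         result[pre:cur + 1] = [seg[cur]] * (cur - pre + 1)
--         cur += 1
--         pre = cur
--     return result
-- ===== SOURCE B (Python) =====
-- def transform2class(seg):
--     trail = 0
--     for v in seg:
--         if v != 0: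
--             trail = v
--     cur = trail
--     result = []
--     for v in reversed(seg):
--         if v != 0:
--             cur = v
--         result.append(cur)
--     result.reverse()
--     return result
-- ===== Notes on version B (the rewrite author's own statement) =====
-- stated objective: simpler
-- what changed: A back-fills run slices of the result array via nested while loops and slice assignment; B makes one forward pass to find the last nonzero value and one backward pass that carries the current label, with no index arithmetic or slice writes.
import Mathlib
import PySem

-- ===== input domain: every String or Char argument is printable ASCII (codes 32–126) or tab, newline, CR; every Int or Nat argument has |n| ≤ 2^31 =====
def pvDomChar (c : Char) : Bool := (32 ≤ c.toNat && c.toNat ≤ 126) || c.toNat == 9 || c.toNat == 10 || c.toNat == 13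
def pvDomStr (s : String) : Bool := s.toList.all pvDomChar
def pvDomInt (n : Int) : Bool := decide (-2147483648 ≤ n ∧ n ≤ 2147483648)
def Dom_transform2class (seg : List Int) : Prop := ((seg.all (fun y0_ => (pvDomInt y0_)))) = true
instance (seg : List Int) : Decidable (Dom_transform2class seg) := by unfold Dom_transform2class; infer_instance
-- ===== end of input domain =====

-- B is a simpler one-pass-backwards rewrite: it carries the current label right-to-left instead of
-- back-filling run slices; both are linear, the objective is 'simpler'.

-- ===== PORT A =====
-- inner `while cur < length and seg[cur] == 0: cur += 1` (index always in range, so getD is exact)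
def pvSkip (seg : List Int) (cur : Nat) : Nat :=
  if cur < seg.length then
    if seg.getD cur 0 = 0 then pvSkip seg (cur + 1) else cur
  else cur
termination_by seg.length - cur

theorem pvSkip_ge (seg : List Int) (cur : Nat) : cur ≤ pvSkip seg cur := by
  rw [pvSkip]
  split
  · split
    · exact le_trans (Nat.le_succ cur) (pvSkip_ge seg (cur + 1))
    · exact le_refl cur
  · exact le_refl cur
termination_by seg.length - cur

-- outer while loop of A; `result[a:b] = [v]*(b-a)` is take/replicate/drop (slice in range, exact);
-- `seg[pre-1]` may be the Python index -1, hence pyGet? (always in range here, so getD is exact)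
def pvLoopA (seg result : List Int) (pre cur : Nat) : List Int :=
  if h : cur < seg.length then
    let c := pvSkip seg cur
    if c = seg.length then
      result.take pre ++ List.replicate (seg.length - pre) ((PySem.List.pyGet? seg ((pre : Int) - 1)).getD 0)
    else
      pvLoopA seg (result.take pre ++ List.replicate (c - pre + 1) (seg.getD c 0) ++ result.drop (c + 1)) (c + 1) (c + 1)
  else result
termination_by seg.length - cur
decreasing_by
  have := pvSkip_ge seg cur
  omega

def transform2class (seg : List Int) : List Int :=
  pvLoopA seg (List.replicate seg.length (-1)) 0 0

-- ===== PORT B =====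
-- one step of B's backward loop: update the carried label, append it
def pvStepB (p : List Int × Int) (v : Int) : List Int × Int :=
  (p.1 ++ [if v ≠ 0 then v else p.2], if v ≠ 0 then v else p.2)

def transform2class_alt (seg : List Int) : List Int :=
  let trail := seg.foldl (fun t v => if v ≠ 0 then v else t) 0
  ((seg.reverse.foldl pvStepB ([], trail)).1).reverse

-- ===== PRECONDITION & SPEC =====
def Spec_transform2class (seg : List Int) (out : List Int) : Prop := out = transform2class_alt seg
instance (seg : List Int) (out : List Int) : Decidable (Spec_transform2class seg out) := by unfold Spec_transform2class; infer_instance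

-- ===== CLAIM (what is proved, stated in full; the proofs are below) =====
def Claim_equal_transform2class : Prop := ∀ (seg : List Int), Dom_transform2class seg → Spec_transform2class seg (transform2class seg)

-- ===== LEMMAS AND PROOFS =====

-- the common middle spec: label i = nearest nonzero at/after i, default t
def pvG : List Int → Int → List Int
  | [], _ => []
  | v :: rest, t =>
    let r := pvG rest t
    (if v ≠ 0 then v else r.headD t) :: r

-- the carried-label update, as a named function
def pvUpd (t v : Int) : Int := if v ≠ 0 then v else t

theorem pvSkip_le (seg : List Int) (cur : Nat) (h : cur ≤ seg.length) :
    pvSkip seg cur ≤ seg.length := by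
  rw [pvSkip]
  split
  · split
    · exact pvSkip_le seg (cur + 1) (by omega)
    · omega
  · omega
termination_by seg.length - cur

theorem pvSkip_get (seg : List Int) (cur : Nat) (h : pvSkip seg cur < seg.length) :
    seg.getD (pvSkip seg cur) 0 ≠ 0 := by
  by_cases hc : cur < seg.length
  · by_cases hz : seg.getD cur 0 = 0
    · rw [pvSkip, if_pos hc, if_pos hz] at h ⊢
      exact pvSkip_get seg (cur + 1) h
    · rw [pvSkip, if_pos hc, if_neg hz] at h ⊢
      exact hz
  · rw [pvSkip, if_neg hc] at h
    omega
termination_by seg.length - cur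

theorem pvSkip_drop (seg : List Int) (cur : Nat) (_h : cur ≤ seg.length) :
    seg.drop cur = List.replicate (pvSkip seg cur - cur) 0 ++ seg.drop (pvSkip seg cur) := by
  rw [pvSkip]
  split
  · split
    · have hge := pvSkip_ge seg (cur + 1)
      have ih := pvSkip_drop seg (cur + 1) (by omega)
      have hd : seg.drop cur = seg.getD cur 0 :: seg.drop (cur + 1) := by
        rw [List.getD_eq_getElem seg 0 (by omega), List.drop_eq_getElem_cons]
      rw [hd, ‹seg.getD cur 0 = 0›, ih]
      have : pvSkip seg (cur + 1) - cur = (pvSkip seg (cur + 1) - (cur + 1)) + 1 := by omega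
      rw [this, List.replicate_succ, List.cons_append]
    · simp
  · simp
termination_by seg.length - cur

theorem pvG_zero (m : Nat) (t : Int) : pvG (List.replicate m 0) t = List.replicate m t := by
  induction m with
  | zero => rfl
  | succ k ih =>
    rw [List.replicate_succ, pvG, ih, List.replicate_succ]
    congr 1
    cases k <;> simp [List.replicate_succ]

theorem pvG_block (k : Nat) (rest : List Int) (v t : Int) (hv : v ≠ 0) :
    pvG (List.replicate k 0 ++ v :: rest) t = List.replicate (k + 1) v ++ pvG rest t := by
  induction k with
  | zero => simp [pvG, hv]
  | succ n ih =>
    rw [List.replicate_succ, List.cons_append, pvG, ih]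
    simp [List.replicate_succ]

theorem foldl_upd_zero (l : List Int) (a : Int) (h : ∀ x ∈ l, x = 0) :
    List.foldl pvUpd a l = a := by
  induction l with
  | nil => rfl
  | cons x xs ih =>
    have hx : x = 0 := h x (by simp)
    simp only [List.foldl_cons, pvUpd, hx]
    simp only [ne_eq, not_true_eq_false, ite_false]
    exact ih (fun y hy => h y (by simp [hy]))

theorem foldB_snd (rl : List Int) (acc : List Int) (c : Int) :
    (List.foldl pvStepB (acc, c) rl).2 = List.foldl pvUpd c rl := by
  induction rl generalizing acc c with
  | nil => rfl
  | cons v vs ih => simp only [List.foldl_cons, pvStepB, pvUpd]; exact ih _ _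

theorem headD_pvG (l : List Int) (t : Int) :
    List.foldl pvUpd t l.reverse = (pvG l t).headD t := by
  induction l with
  | nil => rfl
  | cons v rest ih =>
    rw [List.reverse_cons, List.foldl_append]
    simp only [List.foldl_cons, List.foldl_nil, pvUpd, pvG, ih]
    cases h : pvG rest t <;> simp

theorem alt_eq_pvG (l : List Int) (c : Int) :
    ((l.reverse.foldl pvStepB ([], c)).1).reverse = pvG l c := by
  induction l generalizing c with
  | nil => rfl
  | cons v rest ih =>
    rw [List.reverse_cons, List.foldl_append]
    simp only [List.foldl_cons, List.foldl_nil]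
    rw [show (List.foldl pvStepB ([], c) rest.reverse) =
        ((List.foldl pvStepB ([], c) rest.reverse).1, (List.foldl pvStepB ([], c) rest.reverse).2) from rfl]
    simp only [pvStepB]
    rw [foldB_snd, headD_pvG]
    simp only [List.reverse_append, List.reverse_cons, List.reverse_nil, List.nil_append,
      List.cons_append]
    rw [ih]
    simp [pvG]

theorem loopA_eq (seg : List Int) (pre : Nat) (result : List Int)
    (h1 : pre ≤ seg.length) (h2 : result.length = seg.length)
    (h3 : pre = 0 ∨ seg.getD (pre - 1) 0 ≠ 0) :
    pvLoopA seg result pre pre = result.take pre ++ pvG (seg.drop pre) (List.foldl pvUpd 0 seg) := by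
  by_cases hlt : pre < seg.length
  · set c := pvSkip seg pre with hc
    have hge : pre ≤ c := pvSkip_ge seg pre
    have hle : c ≤ seg.length := pvSkip_le seg pre (by omega)
    have hdrop : seg.drop pre = List.replicate (c - pre) 0 ++ seg.drop c :=
      pvSkip_drop seg pre (by omega)
    by_cases hcl : c = seg.length
    · -- trailing all-zero part
      rw [pvLoopA, dif_pos hlt, if_pos hcl]
      have hdz : seg.drop pre = List.replicate (seg.length - pre) 0 := by
        rw [hdrop, hcl]; simp
      have hg : pvG (seg.drop pre) (List.foldl pvUpd 0 seg) =
          List.replicate (seg.length - pre) (List.foldl pvUpd 0 seg) := by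
        rw [hdz, pvG_zero]
      rw [hg]
      congr 2
      -- val = trail
      have hsplit : seg = seg.take pre ++ seg.drop pre := (List.take_append_drop pre seg).symm
      have htr : List.foldl pvUpd 0 seg = List.foldl pvUpd 0 (seg.take pre) := by
        conv_lhs => rw [hsplit]
        rw [List.foldl_append]
        apply foldl_upd_zero
        intro x hx
        rw [hdz] at hx
        exact List.eq_of_mem_replicate hx
      rcases Nat.eq_zero_or_pos pre with h0 | hpos
      · -- pre = 0 : whole list is zero; seg[-1] = 0 = trail
        subst h0
        have hall : seg = List.replicate seg.length 0 := by
          simpa using hdz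
        rw [htr]
        simp only [List.take_zero, List.foldl_nil]
        show (PySem.List.pyGet? seg ((0 : Int) - 1)).getD 0 = 0
        rw [show ((0 : Int) - 1) = -1 by norm_num, PySem.List.pyGet?_neg_one]
        cases hx : seg.getLast? with
        | none => rfl
        | some x =>
          have hxm : x ∈ seg := List.mem_of_getLast? hx
          rw [hall] at hxm
          simpa using List.eq_of_mem_replicate hxm
      · -- pre > 0 : seg[pre-1] is the last nonzero
        have hnz : seg.getD (pre - 1) 0 ≠ 0 := h3.resolve_left (by omega)
        obtain ⟨m, rfl⟩ : ∃ m, pre = m + 1 := ⟨pre - 1, by omega⟩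
        simp only [Nat.add_sub_cancel] at hnz
        have hidx : (((m + 1 : Nat) : Int) - 1) = ((m : Nat) : Int) := by push_cast; ring
        rw [hidx, PySem.List.pyGet?_natCast]
        have hlt1 : m < seg.length := by omega
        rw [List.getElem?_eq_getElem hlt1]
        simp only [Option.getD_some]
        have htk : seg.take (m + 1) = seg.take m ++ [seg[m]] := by
          rw [List.take_add_one, List.getElem?_eq_getElem hlt1]
          rfl
        rw [htr, htk, List.foldl_append]
        simp only [List.foldl_cons, List.foldl_nil, pvUpd]
        rw [List.getD_eq_getElem seg 0 hlt1] at hnz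
        rw [if_pos hnz]
    · -- a nonzero boundary at c < length
      have hclt : c < seg.length := by omega
      have hnz : seg.getD c 0 ≠ 0 := pvSkip_get seg pre hclt
      rw [pvLoopA, dif_pos hlt, if_neg hcl]
      have ih := loopA_eq seg (c + 1)
        (result.take pre ++ List.replicate (c - pre + 1) (seg.getD c 0) ++ result.drop (c + 1))
        (by omega)
        (by simp [List.length_take, List.length_drop]; omega)
        (Or.inr (by simpa using hnz))
      rw [← hc]
      rw [ih]
      have hAB : (result.take pre ++ List.replicate (c - pre + 1) (seg.getD c 0)).length = c + 1 := by
        simp [List.length_take]; omega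
      rw [List.append_assoc] at *
      have htake : ((result.take pre ++ (List.replicate (c - pre + 1) (seg.getD c 0) ++ result.drop (c + 1)))).take (c + 1)
          = result.take pre ++ List.replicate (c - pre + 1) (seg.getD c 0) := by
        rw [← List.append_assoc, List.take_left' hAB]
      rw [htake, List.append_assoc]
      congr 1
      -- pvG (drop pre) t = replicate (c-pre+1) seg[c] ++ pvG (drop (c+1)) t
      have hdc : seg.drop c = seg.getD c 0 :: seg.drop (c + 1) := by
        rw [List.getD_eq_getElem seg 0 hclt, List.drop_eq_getElem_cons]
      rw [hdrop, hdc, pvG_block _ _ _ _ hnz]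
  · -- pre = length
    have hpe : pre = seg.length := by omega
    rw [pvLoopA, dif_neg hlt]
    rw [hpe, List.drop_length]
    show result = result.take seg.length ++ pvG [] (List.foldl pvUpd 0 seg)
    rw [← h2, List.take_length]
    simp [pvG]
termination_by seg.length - pre
decreasing_by
  have := pvSkip_ge seg pre
  omega

-- ===== VERDICT (by name: the statement is the Claim_ definition above) =====
theorem transform2class_spec : Claim_equal_transform2class := by
  intro seg _
  unfold Spec_transform2class transform2class transform2class_alt
  have h := loopA_eq seg 0 (List.replicate seg.length (-1)) (Nat.zero_le _) (by simp) (Or.inl rfl)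
  simp only [List.take_zero, List.drop_zero, List.nil_append] at h
  rw [h, alt_eq_pvG]
  rfl
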